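-- pv_equiv track=rewrite | github.com/wingedsheep/music-generation-toolbox | example/test.py | split_into_bars
-- ===== SOURCE A (Python) =====
-- def pad_right(data, padding_character=0, padding_length=512):
--     while len(data) < padding_length:
--         data.append(padding_character)
--     return data
--
-- def split_into_bars(data, split_word=2, padding_character=0, padding_length=256):
--     result = []
--     split = []
--     for index, value in enumerate(data):
--         if value == split_word:
--             if len(split) > 0:
--                 result.append(pad_right(split, padding_character, padding_length))
--                 split = []
--         else:
--             split.append(value)
--     if len(split) > 0:
--         result.append(pad_right(split, padding_character, padding_length))
--
--     return result
-- ===== SOURCE B (Python) =====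
-- def split_into_bars(data, split_word=2, padding_character=0, padding_length=256):
--     # First pass: indices of every delimiter; second pass: slice each gap and pad it.
--     cuts = [i for i, v in enumerate(data) if v == split_word]
--     starts = [0] + [c + 1 for c in cuts]
--     ends = cuts + [len(data)]
--     result = []
--     for lo, hi in zip(starts, ends):
--         seg = data[lo:hi]
--         if seg:
--             result.append(seg + [padding_character] * (padding_length - len(seg)))
--     return result
-- ===== Notes on version B (the rewrite author's own statement) =====
-- stated objective: alternative
-- what changed: Replaces A's element-by-element accumulation with a current-bar buffer (plus a final flush) by a two-pass boundary-index scheme: collect all delimiter positions, then slice each gap out of data and pad non-empty slices with list multiplication.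
import Mathlib
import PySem

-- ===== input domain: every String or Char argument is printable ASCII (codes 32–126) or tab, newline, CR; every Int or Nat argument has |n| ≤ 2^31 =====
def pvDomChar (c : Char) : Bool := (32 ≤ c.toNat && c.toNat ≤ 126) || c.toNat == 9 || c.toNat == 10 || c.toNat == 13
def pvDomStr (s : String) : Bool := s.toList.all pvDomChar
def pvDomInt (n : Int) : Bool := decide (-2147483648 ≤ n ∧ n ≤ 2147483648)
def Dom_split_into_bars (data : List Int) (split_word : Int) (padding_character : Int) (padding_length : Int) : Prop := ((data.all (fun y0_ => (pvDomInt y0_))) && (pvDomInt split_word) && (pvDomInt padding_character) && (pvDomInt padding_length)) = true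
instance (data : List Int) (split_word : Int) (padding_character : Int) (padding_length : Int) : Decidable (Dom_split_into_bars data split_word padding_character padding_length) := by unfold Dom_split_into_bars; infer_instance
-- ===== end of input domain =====

-- B replaces A's single accumulation loop (current-bar buffer + final flush) by a two-pass
-- boundary-index scheme (collect delimiter indices, then slice and pad each gap); objective: alternative.
-- A mutates the list bound to its local `split` via pad_right (not the caller's `data`); the equivalence is about the return value.

-- ===== PORT A =====
def pad_right (data : List Int) (padding_character : Int) (padding_length : Int) : List Int :=
  if (data.length : Int) < padding_length then
    pad_right (data ++ [padding_character]) padding_character padding_length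
  else data
termination_by (padding_length - (data.length : Int)).toNat
decreasing_by simp only [List.length_append, List.length_cons, List.length_nil]; omega

def splitLoop (sw pc pl : Int) : List Int → List (List Int) → List Int → List (List Int)
  | [], result, split =>
      if split.length > 0 then result ++ [pad_right split pc pl] else result
  | v :: rest, result, split =>
      if v = sw then
        if split.length > 0 then splitLoop sw pc pl rest (result ++ [pad_right split pc pl]) []
        else splitLoop sw pc pl rest result split
      else splitLoop sw pc pl rest result (split ++ [v])

def split_into_bars (data : List Int) (split_word : Int) (padding_character : Int) (padding_length : Int) : List (List Int) :=
  splitLoop split_word padding_character padding_length data [] []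

-- ===== PORT B =====
def split_into_bars_alt (data : List Int) (split_word : Int) (padding_character : Int) (padding_length : Int) : List (List Int) :=
  let cuts : List Int := (PySem.List.enumerate data).filterMap
    (fun iv => if iv.2 = split_word then some iv.1 else none)
  let starts : List Int := 0 :: cuts.map (· + 1)
  let ends : List Int := cuts ++ [(data.length : Int)]
  (starts.zip ends).foldl (fun res lh =>
    let seg := PySem.List.slice data (some lh.1) (some lh.2)
    if seg ≠ [] then
      res ++ [seg ++ List.replicate (padding_length - (seg.length : Int)).toNat padding_character]
    else res) []

-- ===== PRECONDITION & SPEC =====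
def Spec_split_into_bars (data : List Int) (split_word : Int) (padding_character : Int) (padding_length : Int) (out : List (List Int)) : Prop := out = split_into_bars_alt data split_word padding_character padding_length
instance (data : List Int) (split_word : Int) (padding_character : Int) (padding_length : Int) (out : List (List Int)) : Decidable (Spec_split_into_bars data split_word padding_character padding_length out) := by unfold Spec_split_into_bars; infer_instance

-- ===== CLAIM (what is proved, stated in full; the proofs are below) =====
def Claim_equal_split_into_bars : Prop := ∀ (data : List Int) (split_word : Int) (padding_character : Int) (padding_length : Int), Dom_split_into_bars data split_word padding_character padding_length → Spec_split_into_bars data split_word padding_character padding_length (split_into_bars data split_word padding_character padding_length)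

-- ===== LEMMAS AND PROOFS =====

-- the padded bar both programs produce for a non-empty segment s
def padTo (pc pl : Int) (s : List Int) : List Int :=
  s ++ List.replicate (pl - (s.length : Int)).toNat pc

theorem pad_right_eq (pc pl : Int) (s : List Int) : pad_right s pc pl = padTo pc pl s := by
  generalize h : (pl - (s.length : Int)).toNat = n
  induction n generalizing s with
  | zero =>
      rw [pad_right]
      have hnot : ¬ ((s.length : Int) < pl) := by omega
      simp [hnot, padTo, show (pl - (s.length : Int)).toNat = 0 from h]
  | succ n ih =>
      have hlt : (s.length : Int) < pl := by omega
      rw [pad_right, if_pos hlt, ih (s ++ [pc]) (by simp; omega)]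
      simp [padTo]
      have h1 : pl.toNat - s.length = n + 1 := by omega
      rw [h1, List.replicate_succ]
      have h2 : (pl - ((s.length : Int) + 1)).toNat = n := by omega
      rw [h2]

-- A's loop computes the padded non-empty pieces of splitOnP, with `split` prepended to the first piece
theorem splitLoop_eq (sw pc pl : Int) (rest : List Int) : ∀ (result : List (List Int)) (split : List Int),
    splitLoop sw pc pl rest result split =
      result ++ ((((rest.splitOnP (fun v => v == sw)).modifyHead (split ++ ·)).filter
        (fun s => !s.isEmpty)).map (padTo pc pl)) := by
  induction rest with
  | nil =>
      intro result split
      by_cases hs : split = []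
      · subst hs; simp [splitLoop, List.splitOnP_nil, List.modifyHead]
      · have hlen : split.length > 0 := List.length_pos_of_ne_nil hs
        simp [splitLoop, List.splitOnP_nil, List.modifyHead, hlen, hs, pad_right_eq]
  | cons v rest ih =>
      intro result split
      obtain ⟨h0, t0, heq⟩ := List.exists_cons_of_ne_nil (List.splitOnP_ne_nil (fun x => x == sw) rest)
      by_cases hv : v = sw
      · by_cases hs : split = []
        · subst hs
          simp only [splitLoop, if_pos hv, List.length_nil, gt_iff_lt, lt_irrefl, if_false]
          rw [ih, List.splitOnP_cons, heq]
          simp [hv, List.modifyHead]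
        · have hlen : split.length > 0 := List.length_pos_of_ne_nil hs
          simp only [splitLoop, if_pos hv, if_pos hlen]
          rw [ih, List.splitOnP_cons, heq]
          simp [hv, List.modifyHead, hs, pad_right_eq]
      · simp only [splitLoop, if_neg hv]
        rw [ih, List.splitOnP_cons, heq]
        simp [hv, List.modifyHead]

theorem splitIntoBars_eq (data : List Int) (sw pc pl : Int) :
    split_into_bars data sw pc pl =
      ((data.splitOnP (fun v => v == sw)).filter (fun s => !s.isEmpty)).map (padTo pc pl) := by
  rw [split_into_bars, splitLoop_eq]
  obtain ⟨h0, t0, heq⟩ := List.exists_cons_of_ne_nil (List.splitOnP_ne_nil (fun x => x == sw) data)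
  simp [heq, List.modifyHead]

-- B side: delimiter indices with a given start offset
def cutsF (sw : Int) (s : Int) (xs : List Int) : List Int :=
  (PySem.List.enumerate xs s).filterMap (fun iv => if iv.2 = sw then some iv.1 else none)

theorem cutsF_succ (sw : Int) (xs : List Int) : ∀ (s : Int),
    cutsF sw (s + 1) xs = (cutsF sw s xs).map (· + 1) := by
  induction xs with
  | nil => intro s; simp [cutsF, PySem.List.enumerate_nil]
  | cons x xs ih =>
      intro s
      simp only [cutsF, PySem.List.enumerate_cons, List.filterMap_cons]
      by_cases hx : x = sw
      · simp only [hx, if_pos]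
        have h1 : cutsF sw (s + 1 + 1) xs = (cutsF sw (s + 1) xs).map (· + 1) := ih (s + 1)
        simp only [cutsF] at h1
        simp [h1]
      · simp only [if_neg hx]
        have h1 : cutsF sw (s + 1 + 1) xs = (cutsF sw (s + 1) xs).map (· + 1) := ih (s + 1)
        simp only [cutsF] at h1
        simp [h1]

theorem cutsF_nonneg (sw : Int) (xs : List Int) : ∀ c ∈ cutsF sw 0 xs, 0 ≤ c := by
  intro c hc
  simp only [cutsF, List.mem_filterMap] at hc
  obtain ⟨iv, hiv, hf⟩ := hc
  rw [PySem.List.mem_enumerate_iff] at hiv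
  obtain ⟨k, hk, rfl⟩ := hiv
  split at hf
  · injection hf with h; simp at h ⊢; omega
  · exact absurd hf (by simp)

theorem slice_succ_succ (x : Int) (xs : List Int) (a b : Int) (ha : 0 ≤ a) (hb : 0 ≤ b) :
    PySem.List.slice (x :: xs) (some (a + 1)) (some (b + 1)) = PySem.List.slice xs (some a) (some b) := by
  rw [PySem.List.slice_toNat _ (by omega) (by omega), PySem.List.slice_toNat _ ha hb]
  have h1 : (a + 1).toNat = a.toNat + 1 := by omega
  have h2 : (b + 1).toNat = b.toNat + 1 := by omega
  rw [h1, h2]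
  simp [List.drop_succ_cons, Nat.add_sub_add_right]

theorem slice_zero_succ (x : Int) (xs : List Int) (b : Int) (hb : 0 ≤ b) :
    PySem.List.slice (x :: xs) (some 0) (some (b + 1)) = x :: PySem.List.slice xs (some 0) (some b) := by
  rw [PySem.List.slice_toNat _ (by omega) (by omega), PySem.List.slice_toNat _ (by omega) hb]
  have h2 : (b + 1).toNat = b.toNat + 1 := by omega
  rw [h2]
  simp [List.take_succ_cons]

theorem slice_zero_zero (xs : List Int) :
    PySem.List.slice xs (some 0) (some 0) = [] := by
  rw [PySem.List.slice_toNat _ (by omega) (by omega)]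
  simp

theorem zip_shift (S E : List Int) :
    (S.map (· + 1)).zip (E.map (· + 1)) = (S.zip E).map (fun q => (q.1 + 1, q.2 + 1)) := by
  rw [List.zip_map]
  apply List.map_congr_left
  intro q _
  cases q; rfl

theorem mapSlices_eq (sw : Int) (data : List Int) :
    (((0 :: (cutsF sw 0 data).map (· + 1)).zip (cutsF sw 0 data ++ [(data.length : Int)])).map
        (fun q => PySem.List.slice data (some q.1) (some q.2))) =
      data.splitOnP (fun v => v == sw) := by
  induction data with
  | nil =>
      simp only [cutsF, PySem.List.enumerate_nil, List.filterMap_nil, List.map_nil,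
        List.nil_append, List.length_nil, Nat.cast_zero, List.zip_cons_cons, List.zip_nil_right,
        List.map_cons, List.map_nil, List.splitOnP_nil, slice_zero_zero]
  | cons v rest ih =>
      have hC : ∀ c ∈ cutsF sw 0 rest, 0 ≤ c := cutsF_nonneg sw rest
      have hc0 : cutsF sw 0 (v :: rest) =
          (if v = sw then (0 : Int) :: (cutsF sw 0 rest).map (· + 1)
           else (cutsF sw 0 rest).map (· + 1)) := by
        have h1 : cutsF sw (0 + 1) rest = (cutsF sw 0 rest).map (· + 1) := cutsF_succ sw rest 0
        simp only [cutsF, PySem.List.enumerate_cons, List.filterMap_cons]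
        by_cases hv : v = sw
        · simp only [if_pos hv]
          simpa [cutsF] using congrArg (List.cons (0 : Int)) (by simpa [cutsF] using h1)
        · simp only [if_neg hv]
          simpa [cutsF] using h1
      have hlen : ((v :: rest).length : Int) = (rest.length : Int) + 1 := by
        rw [List.length_cons]; push_cast; ring
      rw [List.splitOnP_cons]
      by_cases hv : v = sw
      · rw [hc0, if_pos hv, if_pos (by simp [hv]), hlen]
        have h1 : ((0 : Int) :: (cutsF sw 0 rest).map (· + 1)) ++ [(rest.length : Int) + 1] =
            (0 : Int) :: ((cutsF sw 0 rest ++ [(rest.length : Int)]).map (· + 1)) := by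
          simp
        rw [h1, List.zip_cons_cons,
          zip_shift ((0 : Int) :: (cutsF sw 0 rest).map (· + 1)) (cutsF sw 0 rest ++ [(rest.length : Int)]),
          List.map_cons, List.map_map, slice_zero_zero]
        congr 1
        rw [← ih]
        apply List.map_congr_left
        intro q hq
        obtain ⟨hq1, hq2⟩ := List.of_mem_zip hq
        have h1 : 0 ≤ q.1 := by
          rcases List.mem_cons.mp hq1 with h | h
          · omega
          · obtain ⟨c, hc, hce⟩ := List.mem_map.mp h
            have := hC c hc; omega
        have h2 : 0 ≤ q.2 := by
          rcases List.mem_append.mp hq2 with h | h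
          · exact hC q.2 h
          · simp at h; omega
        simp only [Function.comp]
        exact slice_succ_succ v rest q.1 q.2 h1 h2
      · rw [hc0, if_neg hv, if_neg (by simp [hv]), hlen]
        obtain ⟨e0, e', hEe⟩ := List.exists_cons_of_ne_nil
          (show (cutsF sw 0 rest) ++ [(rest.length : Int)] ≠ [] by simp)
        have he0 : 0 ≤ e0 := by
          have : e0 ∈ (cutsF sw 0 rest) ++ [(rest.length : Int)] := by
            rw [hEe]; exact List.mem_cons_self
          rcases List.mem_append.mp this with h | h
          · exact hC e0 h
          · simp at h; omega
        have he' : ∀ b ∈ e', 0 ≤ b := by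
          intro b hb
          have : b ∈ (cutsF sw 0 rest) ++ [(rest.length : Int)] := by
            rw [hEe]; exact List.mem_cons_of_mem _ hb
          rcases List.mem_append.mp this with h | h
          · exact hC b h
          · simp at h; omega
        have h1 : (cutsF sw 0 rest).map (· + 1) ++ [(rest.length : Int) + 1] =
            (cutsF sw 0 rest ++ [(rest.length : Int)]).map (· + 1) := by
          simp
        rw [h1, hEe, List.map_cons, List.zip_cons_cons, zip_shift ((cutsF sw 0 rest).map (· + 1)) e',
          List.map_cons, List.map_map]
        have ih' : PySem.List.slice rest (some 0) (some e0) ::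
            (((cutsF sw 0 rest).map (· + 1)).zip e').map
              (fun q => PySem.List.slice rest (some q.1) (some q.2)) =
            rest.splitOnP (fun x => x == sw) := by
          rw [← ih, hEe, List.zip_cons_cons, List.map_cons]
        rw [← ih']
        simp only [List.modifyHead]
        congr 1
        · exact slice_zero_succ v rest e0 he0
        · apply List.map_congr_left
          intro q hq
          obtain ⟨hq1, hq2⟩ := List.of_mem_zip hq
          have hx1 : 0 ≤ q.1 := by
            obtain ⟨c, hc, hce⟩ := List.mem_map.mp hq1
            have := hC c hc; omega
          have hx2 : 0 ≤ q.2 := he' q.2 hq2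
          simp only [Function.comp]
          exact slice_succ_succ v rest q.1 q.2 hx1 hx2

theorem splitIntoBarsAlt_eq (data : List Int) (sw pc pl : Int) :
    split_into_bars_alt data sw pc pl =
      ((data.splitOnP (fun v => v == sw)).filter (fun s => !s.isEmpty)).map (padTo pc pl) := by
  simp only [split_into_bars_alt]
  rw [PySem.List.foldl_append_ite
    (p := fun q : Int × Int => PySem.List.slice data (some q.1) (some q.2) ≠ [])
    (f := fun q : Int × Int => PySem.List.slice data (some q.1) (some q.2) ++
      List.replicate (pl - ((PySem.List.slice data (some q.1) (some q.2)).length : Int)).toNat pc)]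
  rw [← mapSlices_eq sw data, List.filter_map, List.map_map]
  simp only [List.nil_append]
  congr 1
  simp only [cutsF]
  congr 1
  funext q
  rcases h : PySem.List.slice data (some q.1) (some q.2) with _ | _ <;> simp [h]

-- ===== VERDICT (by name: the statement is the Claim_ definition above) =====
theorem split_into_bars_spec : Claim_equal_split_into_bars := by
  intro data sw pc pl _
  unfold Spec_split_into_bars
  rw [splitIntoBars_eq, splitIntoBarsAlt_eq]
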